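-- pv_equiv track=rewrite | github.com/PhoneticsBug/Code-Workouts | workouts/Algorithm/2023/12. December/week4/lv3. 인사고과/solution.py | solution
-- ===== SOURCE A (Python) =====
-- def solution(scores):
--     wanho = scores[0]
--     candidate = []
--
--     for i, score1 in enumerate(scores):
--         for j, score2 in enumerate(scores):
--             if i != j and score1[0] < score2[0] and score1[1] < score2[1]:
--                 break
--         else:
--             candidate.append(score1)
--
--     if wanho not in candidate:
--         return -1
--
--     candidate.sort(key=sum, reverse=True)
--
--     return candidate.index(wanho) + 1
-- ===== SOURCE B (Python) =====
-- def solution(scores):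
--     wanho = scores[0]
--     if any(s[0] > wanho[0] and s[1] > wanho[1] for s in scores):
--         return -1
--     sw = sum(wanho)
--     rank = 1
--     for s in scores:
--         if sum(s) > sw and not any(t[0] > s[0] and t[1] > s[1] for t in scores):
--             rank += 1
--     return rank
-- ===== Notes on version B (the rewrite author's own statement) =====
-- stated objective: simpler
-- what changed: B drops A's candidate-list construction, stable sort and index scan: since Wanho is the first element, his rank is simply 1 + the number of non-dominated rows with a strictly larger sum, so B computes the rank by direct counting.
-- outside the precondition, e.g. on solution([[]]): A returns 1, B raises IndexError; on solution([[5]]): A returns 1, B returns 1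
import Mathlib
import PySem

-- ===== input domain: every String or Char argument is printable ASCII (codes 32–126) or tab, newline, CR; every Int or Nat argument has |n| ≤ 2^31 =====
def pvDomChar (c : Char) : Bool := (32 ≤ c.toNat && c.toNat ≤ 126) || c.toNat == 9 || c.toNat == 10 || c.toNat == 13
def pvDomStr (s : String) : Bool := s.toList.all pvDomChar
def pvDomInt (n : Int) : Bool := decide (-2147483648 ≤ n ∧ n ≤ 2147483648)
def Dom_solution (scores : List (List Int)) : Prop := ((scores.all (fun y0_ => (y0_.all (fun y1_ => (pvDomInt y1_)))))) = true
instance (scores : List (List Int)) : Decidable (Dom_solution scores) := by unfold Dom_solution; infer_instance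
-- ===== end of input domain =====

-- B replaces A's sort-then-index ranking by a direct count (rank = 1 + number of
-- non-dominated rows with a larger sum), dropping the candidate list, the sort and
-- the index scan: simpler, same exact value.

-- ===== PORT A =====
-- s[i] on a row (Python raises when out of range; such inputs are outside Pre_)
def pvIxA (s : List Int) (i : Int) : Int := (PySem.List.pyGet? s i).getD 0

-- inner 'for j, score2 in enumerate(scores): if i != j and …: break' — True iff the break fires
def pvBreakA (scores : List (List Int)) (i : Int) (score1 : List Int) : Bool :=
  (PySem.List.enumerate scores 0).any (fun q =>
    decide (i ≠ q.1) && decide (pvIxA score1 0 < pvIxA q.2 0) && decide (pvIxA score1 1 < pvIxA q.2 1))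

def solution (scores : List (List Int)) : Int :=
  let wanho := (PySem.List.pyGet? scores 0).getD []
  let candidate := (PySem.List.enumerate scores 0).foldl
    (fun acc p => if pvBreakA scores p.1 p.2 then acc else acc ++ [p.2]) []
  if wanho ∉ candidate then -1
  else
    let sortedC := PySem.List.sorted candidate (fun s => s.sum) true
    (((PySem.List.index? sortedC wanho).getD 0 : Nat) : Int) + 1

-- ===== PORT B =====
def pvIxB (s : List Int) (i : Int) : Int := (PySem.List.pyGet? s i).getD 0

-- 'any(t[0] > s[0] and t[1] > s[1] for t in scores)'
def pvBeatenB (scores : List (List Int)) (s : List Int) : Bool :=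
  scores.any (fun t => decide (pvIxB s 0 < pvIxB t 0) && decide (pvIxB s 1 < pvIxB t 1))

def solution_alt (scores : List (List Int)) : Int :=
  let wanho := (PySem.List.pyGet? scores 0).getD []
  if pvBeatenB scores wanho then -1
  else
    let sw := wanho.sum
    scores.foldl (fun rank s =>
      if decide (sw < s.sum) && !pvBeatenB scores s then rank + 1 else rank) 1

-- ===== PRECONDITION & SPEC =====
-- Pre_ excludes the inputs where the Python A raises IndexError (empty scores, or a row
-- shorter than 2 that gets indexed); it also excludes degenerate ragged inputs whose short
-- rows happen to escape indexing through `and` short-circuiting, a shape the problem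
-- (lists of score pairs) never produces.
def Pre_solution (scores : List (List Int)) : Prop :=
  scores ≠ [] ∧ ∀ s ∈ scores, 2 ≤ s.length
instance (scores : List (List Int)) : Decidable (Pre_solution scores) := by
  unfold Pre_solution; infer_instance

def pvWitness_solution : List (List Int) := [[3, 2], [1, 4], [2, 2]]

def Spec_solution (scores : List (List Int)) (out : Int) : Prop := out = solution_alt scores
instance (scores : List (List Int)) (out : Int) : Decidable (Spec_solution scores out) := by unfold Spec_solution; infer_instance

-- ===== CLAIM (what is proved, stated in full; the proofs are below) =====
def Claim_equal_solution : Prop := ∀ (scores : List (List Int)), Dom_solution scores → Pre_solution scores → Spec_solution scores (solution scores)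

-- ===== LEMMAS AND PROOFS =====

lemma insertBy_case_gt {α : Type} (key : α → Int) (w x : α) (hx : key w < key x)
    (A B : List α) :
    ∃ A', PySem.List.insertBy (fun a b => decide (key b < key a)) x (A ++ w :: B) = A' ++ w :: B
      ∧ (∀ a ∈ A', a = x ∨ a ∈ A) ∧ A'.length = A.length + 1 := by
  induction A with
  | nil =>
    refine ⟨[x], ?_, by simp, by simp⟩
    simp [PySem.List.insertBy, hx]
  | cons a A ih =>
    by_cases h : key a < key x
    · refine ⟨x :: a :: A, ?_, by intro y hy; rcases List.mem_cons.mp hy with rfl | hy2; exacts [Or.inl rfl, Or.inr hy2], by simp⟩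
      simp [PySem.List.insertBy, h]
    · obtain ⟨A', hA', hmem, hlen⟩ := ih
      refine ⟨a :: A', ?_, ?_, by simp [hlen]⟩
      · simp [PySem.List.insertBy, h, hA']
      · intro y hy; rcases List.mem_cons.mp hy with rfl | hy
        · exact Or.inr (List.mem_cons_self)
        · exact (hmem y hy).imp id (fun h => List.mem_cons_of_mem _ h)

lemma insertBy_case_le {α : Type} (key : α → Int) (w x : α) (hx : ¬ key w < key x)
    (A B : List α) (hA : ∀ a ∈ A, key w < key a) :
    PySem.List.insertBy (fun a b => decide (key b < key a)) x (A ++ w :: B)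
      = A ++ w :: PySem.List.insertBy (fun a b => decide (key b < key a)) x B := by
  induction A with
  | nil => simp [PySem.List.insertBy, hx]
  | cons a A ih =>
    have ha : ¬ key a < key x := by
      have := hA a List.mem_cons_self; omega
    simp only [List.cons_append, PySem.List.insertBy]
    simp [ha, ih (fun b hb => hA b (List.mem_cons_of_mem _ hb))]

lemma foldl_insertBy_inv {α : Type} (key : α → Int) (w : α) (u : List α) :
    ∀ (A B : List α), (∀ a ∈ A, key w < key a) → (∀ b ∈ B, key b ≤ key w) →
    ∃ A' B', u.foldl (fun acc x => PySem.List.insertBy (fun a b => decide (key b < key a)) x acc) (A ++ w :: B)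
        = A' ++ w :: B'
      ∧ (∀ a ∈ A', key w < key a) ∧ (∀ b ∈ B', key b ≤ key w)
      ∧ A'.length = A.length + u.countP (fun x => decide (key w < key x)) := by
  induction u with
  | nil => intro A B hA hB; exact ⟨A, B, by simp, hA, hB, by simp⟩
  | cons x u ih =>
    intro A B hA hB
    by_cases hx : key w < key x
    · obtain ⟨A1, h1, hmem, hlen⟩ := insertBy_case_gt key w x hx A B
      have hA1 : ∀ a ∈ A1, key w < key a := by
        intro a ha; rcases hmem a ha with rfl | ha2
        · exact hx
        · exact hA a ha2
      obtain ⟨A', B', heq, h2, h3, h4⟩ := ih A1 B hA1 hB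
      refine ⟨A', B', ?_, h2, h3, ?_⟩
      · simpa [h1] using heq
      · simp [h4, hlen, hx]; omega
    · rw [show (x :: u).foldl (fun acc x => PySem.List.insertBy (fun a b => decide (key b < key a)) x acc) (A ++ w :: B)
          = u.foldl _ (PySem.List.insertBy (fun a b => decide (key b < key a)) x (A ++ w :: B)) from rfl,
        insertBy_case_le key w x hx A B hA]
      have hB' : ∀ b ∈ PySem.List.insertBy (fun a b => decide (key b < key a)) x B, key b ≤ key w := by
        intro b hb; rcases (PySem.List.mem_insertBy _ _ _ _).mp hb with rfl | hb2
        · omega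
        · exact hB b hb2
      obtain ⟨A', B', heq, h2, h3, h4⟩ := ih A _ hA hB'
      exact ⟨A', B', heq, h2, h3, by simp [h4, hx]⟩

lemma index_sorted_rev_head {α : Type} [BEq α] [LawfulBEq α] (key : α → Int) (w : α) (tl : List α) :
    PySem.List.index? (PySem.List.sorted (w :: tl) key true) w
      = some (tl.countP (fun x => decide (key w < key x))) := by
  have hrepr := PySem.List.sorted_rev_eq_foldl_insertBy (w :: tl) key
  have hstep : PySem.List.sorted (w :: tl) key true
      = tl.foldl (fun acc x => PySem.List.insertBy (fun a b => decide (key b < key a)) x acc) ([] ++ w :: []) := by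
    simpa [PySem.List.insertBy] using hrepr
  obtain ⟨A', B', heq, hA', hB', hlen⟩ :=
    foldl_insertBy_inv key w tl [] [] (by simp) (by simp)
  rw [hstep, heq]
  have hw : w ∉ A' := by
    intro hmem
    have := hA' w hmem; omega
  rw [PySem.List.index?_eq_some_iff]
  exact ⟨A', B', rfl, by simpa using hlen, hw⟩

lemma break_eq_dom (scores : List (List Int)) (k : Nat) (hk : k < scores.length) :
    pvBreakA scores ((k : Nat) : Int) scores[k] = pvBeatenB scores scores[k] := by
  unfold pvBreakA pvBeatenB
  apply Bool.eq_iff_iff.mpr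
  simp only [List.any_eq_true]
  constructor
  · rintro ⟨q, hq, hcond⟩
    obtain ⟨j, hj, rfl⟩ := (PySem.List.mem_enumerate_iff _ _ _).mp hq
    refine ⟨scores[j], List.getElem_mem hj, ?_⟩
    simp only [Bool.and_eq_true, decide_eq_true_eq] at hcond ⊢
    exact ⟨hcond.1.2, hcond.2⟩
  · rintro ⟨t, ht, hcond⟩
    obtain ⟨j, hj, rfl⟩ := List.mem_iff_getElem.mp ht
    simp only [Bool.and_eq_true, decide_eq_true_eq] at hcond
    have hjk : j ≠ k := by
      rintro rfl
      simp only [pvIxB] at hcond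
      omega
    refine ⟨((0 : Int) + (j : Int), scores[j]), (PySem.List.mem_enumerate_iff _ _ _).mpr ⟨j, hj, rfl⟩, ?_⟩
    simp only [Bool.and_eq_true, decide_eq_true_eq]
    refine ⟨⟨?_, hcond.1⟩, hcond.2⟩
    omega

lemma candidate_eq_filter (scores : List (List Int)) :
    (PySem.List.enumerate scores 0).foldl
      (fun acc p => if pvBreakA scores p.1 p.2 then acc else acc ++ [p.2]) []
    = scores.filter (fun s => !pvBeatenB scores s) := by
  have h1 :
      (PySem.List.enumerate scores 0).foldl
        (fun acc p => if pvBreakA scores p.1 p.2 then acc else acc ++ [p.2]) []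
      = (PySem.List.enumerate scores 0).foldl
        (fun acc p => if !pvBreakA scores p.1 p.2 then acc ++ [p.2] else acc) [] :=
    PySem.List.foldl_congr_mem _ _ _ _
      (by intro acc p _; cases h : pvBreakA scores p.1 p.2 <;> simp)
  rw [h1, PySem.List.foldl_append_if (p := fun p : Int × List Int => !pvBreakA scores p.1 p.2)
    (f := fun p : Int × List Int => p.2)]
  rw [List.filter_congr (q := fun p : Int × List Int => !pvBeatenB scores p.2)
    (by intro p hp
        obtain ⟨k, hk, rfl⟩ := (PySem.List.mem_enumerate_iff _ _ _).mp hp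
        simp [break_eq_dom scores k hk])]
  have h2 := List.filter_map (f := fun p : Int × List Int => p.2)
    (p := fun s => !pvBeatenB scores s) (l := PySem.List.enumerate scores 0)
  rw [PySem.List.map_snd_enumerate] at h2
  simpa [Function.comp_def] using h2.symm

lemma main_thm (scores : List (List Int)) (hne : scores ≠ []) :
    solution scores = solution_alt scores := by
  obtain ⟨w, t, rfl⟩ := List.exists_cons_of_ne_nil hne
  unfold solution solution_alt
  have hw : (PySem.List.pyGet? (w :: t) 0).getD [] = w := by
    simp [PySem.List.pyGet?, PySem.List.pyIdx?]
  rw [hw, candidate_eq_filter]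
  cases hdom : pvBeatenB (w :: t) w with
  | true =>
    simp [hdom]
  | false =>
    have hmem : w ∈ (w :: t).filter (fun s => !pvBeatenB (w :: t) s) := by
      rw [List.mem_filter]
      exact ⟨List.mem_cons_self, by simp [hdom]⟩
    have hfil : (w :: t).filter (fun s => !pvBeatenB (w :: t) s)
        = w :: t.filter (fun s => !pvBeatenB (w :: t) s) := by
      simp [hdom]
    rw [hfil] at hmem ⊢
    simp only [hmem, not_true_eq_false, if_false, hdom]
    rw [index_sorted_rev_head (fun s => s.sum) w (t.filter (fun s => !pvBeatenB (w :: t) s))]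
    rw [PySem.List.foldl_if_add_one (p := fun s => decide (w.sum < s.sum) && !pvBeatenB (w :: t) s)]
    rw [List.countP_filter]
    have : List.countP (fun s => decide (w.sum < s.sum) && !pvBeatenB (w :: t) s) (w :: t)
        = List.countP (fun s => decide (w.sum < s.sum) && !pvBeatenB (w :: t) s) t := by
      rw [List.countP_cons]
      simp
    rw [this]
    simp only [Option.getD_some]
    push_cast
    ring

-- ===== VERDICT (by name: the statement is the Claim_ definition above) =====
theorem solution_spec : Claim_equal_solution := by
  intro scores _ hpre
  unfold Spec_solution
  exact main_thm scores hpre.1
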